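-- pv_equiv track=rewrite | github.com/tebrobert/rt_lang | desugar.py | desugar
-- ===== SOURCE A (Python) =====
-- class DesugarErr(ValueError):
--     def __init__(self, msg):
--         self.msg = f"DesugarErr: {msg}"
--
-- def desugar(code):
--     lines = list(filter(lambda line: line != "", code.split("\n")))
--
--     if lines == []:
--         raise DesugarErr("Yet empty file is unsupported")
--
--     def arrowize(line):
--         i = 0
--         char = line[0]
--         while "a" <= char <= "z" or "A" <= char <= "Z"  or "0" <= char <= "9" or char == "_":
--             i += 1
--             if i == len(line):
--                 return (False, "_", line)
--             char = line[i]
--         while char == " ":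
--             i += 1
--             if i == len(line):
--                 return (False, "_", line)
--             char = line[i]
--         if line[i] != "<":
--             return (False, "_", line)
--         i += 1
--         if i == len(line):
--             return (False, "_", line)
--         if line[i] != "-":
--             return (False, "_", line)
--         i += 1
--         return (True, line[:i-2], line[i:])
--
--     last_line = lines[-1]
--
--     if arrowize(last_line)[0]:
--         raise DesugarErr("The last line can't contain `<-`, you'd probably like to remove it.")
--
--     arrowized_init_lines = list(map(arrowize, lines[:-1]))
--
--     def flatmapize(arrowized_init_lines, last_line):
--         if arrowized_init_lines == []:
--             return last_line
--         _, current_arg, current_monad = arrowized_init_lines[0]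
--         arrowized_rest_lines = arrowized_init_lines[1:]
--         return f"flatmap({current_arg} => {flatmapize(arrowized_rest_lines, last_line)})({current_monad})"
--
--     return flatmapize(arrowized_init_lines, last_line)
-- ===== SOURCE B (Python) =====
-- class DesugarErr(ValueError):
--     def __init__(self, msg):
--         self.msg = f"DesugarErr: {msg}"
--
-- def _is_word(c):
--     return "a" <= c <= "z" or "A" <= c <= "Z" or "0" <= c <= "9" or c == "_"
--
-- def _arrow_parse(line):
--     # peel the leading identifier, then the spaces, off the front of the line;
--     # the line has the arrow shape iff what remains starts with "<-"
--     rest = line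
--     while rest and _is_word(rest[0]):
--         rest = rest[1:]
--     while rest.startswith(" "):
--         rest = rest[1:]
--     if rest.startswith("<-"):
--         return (line[:len(line) - len(rest)], rest[2:])
--     return None
--
-- def desugar(code):
--     lines = [l for l in code.split("\n") if l]
--     if not lines:
--         raise DesugarErr("Yet empty file is unsupported")
--     *init, last = lines
--     if _arrow_parse(last) is not None:
--         raise DesugarErr("The last line can't contain `<-`, you'd probably like to remove it.")
--     result = last
--     for line in reversed(init):
--         parsed = _arrow_parse(line)
--         arg, monad = parsed if parsed is not None else ("_", line)
--         result = f"flatmap({arg} => {result})({monad})"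
--     return result
-- ===== Notes on version B (the rewrite author's own statement) =====
-- stated objective: alternative
-- what changed: arrowize's index-walking character loops are replaced by suffix peeling (two dropWhile-style passes plus a startswith check) returning an Option instead of a flag triple, and the recursive flatmapize is replaced by a reverse fold that wraps the result inside-out; the peeling re-slices the string, so B trades speed on long lines for a plainer decomposition.
import Mathlib
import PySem

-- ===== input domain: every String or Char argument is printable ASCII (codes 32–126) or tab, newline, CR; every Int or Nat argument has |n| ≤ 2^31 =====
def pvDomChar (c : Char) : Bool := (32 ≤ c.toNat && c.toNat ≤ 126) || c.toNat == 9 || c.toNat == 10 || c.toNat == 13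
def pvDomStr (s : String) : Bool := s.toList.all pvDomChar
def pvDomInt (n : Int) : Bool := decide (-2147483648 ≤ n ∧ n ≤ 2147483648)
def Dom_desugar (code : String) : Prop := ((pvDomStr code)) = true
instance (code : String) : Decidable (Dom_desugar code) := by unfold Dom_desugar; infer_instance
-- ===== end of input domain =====

-- B replaces A's index-walking arrowize with suffix-peeling (dropWhile + startswith) returning an
-- Option, and the recursive flatmapize with a reverse fold; return value only — A raises DesugarErr
-- exactly outside Pre_.

def pvIsWordChar (c : Char) : Bool :=
  ('a' ≤ c && c ≤ 'z') || ('A' ≤ c && c ≤ 'Z') || ('0' ≤ c && c ≤ '9') || c == '_'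

-- ===== PORT A =====
-- the index-advancing 'while p(char): i += 1 …' loops of A's arrowize, counting i up over the rest
def pvSkip (p : Char → Bool) : List Char → Nat → Nat
  | [], i => i
  | c :: rest, i => if p c then pvSkip p rest (i + 1) else i

-- A's arrowize; the in-loop 'if i == len(line): return (False, "_", line)' early exits become the
-- 'index reached length' checks after each skip
def pvArrowize (cs : List Char) : Bool × List Char × List Char :=
  let j := pvSkip pvIsWordChar cs 0
  if j = cs.length then (false, ['_'], cs)
  else
    let k := pvSkip (fun c => c == ' ') (cs.drop j) j
    if k = cs.length then (false, ['_'], cs)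
    else if cs[k]? ≠ some '<' then (false, ['_'], cs)
    else if k + 1 = cs.length then (false, ['_'], cs)
    else if cs[k + 1]? ≠ some '-' then (false, ['_'], cs)
    else (true, cs.take k, cs.drop (k + 2))

def pvFlatmapize (arr : List (Bool × List Char × List Char)) (lastLine : List Char) : List Char :=
  match arr with
  | [] => lastLine
  | (_, arg, monad) :: rest =>
      "flatmap(".toList ++ arg ++ " => ".toList ++ pvFlatmapize rest lastLine
        ++ ")(".toList ++ monad ++ ")".toList

def desugar (code : String) : String :=
  let lines := (PySem.Chars.splitOn code.toList ['\n']).filter (fun l => l ≠ [])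
  if lines = [] then ""        -- A raises DesugarErr here; excluded by Pre_
  else
    let lastLine := lines.getLastD []
    if (pvArrowize lastLine).1 then ""   -- A raises DesugarErr here; excluded by Pre_
    else
      let arr := lines.dropLast.map pvArrowize
      String.ofList (pvFlatmapize arr lastLine)

-- ===== PORT B =====
-- B's _arrow_parse: peel the identifier, then the spaces, off the front; arrow shape iff the
-- remaining suffix starts with "<-" (the two 'rest = rest[1:]' loops are the two dropWhiles)
def pvArrowParse (cs : List Char) : Option (List Char × List Char) :=
  let rest := (cs.dropWhile pvIsWordChar).dropWhile (fun c => c == ' ')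
  if rest.take 2 = ['<', '-'] then
    some (cs.take (cs.length - rest.length), rest.drop 2)
  else none

def pvWrap (res : List Char) (line : List Char) : List Char :=
  let (arg, monad) := (pvArrowParse line).getD (['_'], line)
  "flatmap(".toList ++ arg ++ " => ".toList ++ res ++ ")(".toList ++ monad ++ ")".toList

def desugar_alt (code : String) : String :=
  let lines := (PySem.Chars.splitOn code.toList ['\n']).filter (fun l => l ≠ [])
  if lines = [] then ""        -- B raises DesugarErr here; excluded by Pre_
  else
    let lastLine := lines.getLastD []
    if (pvArrowParse lastLine).isSome then ""   -- B raises DesugarErr here; excluded by Pre_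
    else
      String.ofList (lines.dropLast.reverse.foldl pvWrap lastLine)

-- ===== PRECONDITION & SPEC =====
-- closed-form shape test: after the leading word characters and then spaces, the next two
-- characters are `<-` (i.e. the line has the `name <- monad` arrow shape)
def pvArrowShape (cs : List Char) : Bool :=
  ((cs.dropWhile pvIsWordChar).dropWhile (fun c => c == ' ')).take 2 == ['<', '-']

-- Pre_ excludes exactly the inputs on which A raises DesugarErr: a file with no nonempty line,
-- or one whose last nonempty line has the `name <- monad` arrow shape.
def Pre_desugar (code : String) : Prop :=
  let lines := (PySem.Chars.splitOn code.toList ['\n']).filter (fun l => l ≠ [])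
  lines ≠ [] ∧ pvArrowShape (lines.getLastD []) = false
instance (code : String) : Decidable (Pre_desugar code) := by unfold Pre_desugar; infer_instance

def pvWitness_desugar : String := "x <- m\nf(x)"

def Spec_desugar (code : String) (out : String) : Prop := out = desugar_alt code
instance (code : String) (out : String) : Decidable (Spec_desugar code out) := by unfold Spec_desugar; infer_instance

-- ===== CLAIM (what is proved, stated in full; the proofs are below) =====
def Claim_equal_desugar : Prop := ∀ (code : String), Dom_desugar code → Pre_desugar code → Spec_desugar code (desugar code)

-- ===== LEMMAS AND PROOFS =====
theorem pvSkip_spec (p : Char → Bool) (cs : List Char) (i : Nat) :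
    pvSkip p cs i = i + (cs.takeWhile p).length := by
  induction cs generalizing i with
  | nil => simp [pvSkip]
  | cons c rest ih =>
      by_cases h : p c
      · simp [pvSkip, h, ih]; omega
      · simp [pvSkip, h]

-- A's arrowize and B's _arrow_parse compute the same analysis of a line
theorem pvArrowize_eq_parse (cs : List Char) :
    pvArrowize cs = match pvArrowParse cs with
      | some (a, m) => (true, a, m)
      | none => (false, ['_'], cs) := by
  obtain ⟨tw, d1, htw, hd1, hcs1⟩ :
      ∃ tw d1, tw = cs.takeWhile pvIsWordChar ∧ d1 = cs.dropWhile pvIsWordChar ∧ cs = tw ++ d1 :=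
    ⟨_, _, rfl, rfl, (List.takeWhile_append_dropWhile).symm⟩
  obtain ⟨tw2, d2, htw2, hd2, hd1split⟩ :
      ∃ tw2 d2, tw2 = d1.takeWhile (fun c => c == ' ') ∧ d2 = d1.dropWhile (fun c => c == ' ') ∧ d1 = tw2 ++ d2 :=
    ⟨_, _, rfl, rfl, (List.takeWhile_append_dropWhile).symm⟩
  have hj : pvSkip pvIsWordChar cs 0 = tw.length := by rw [pvSkip_spec, htw]; omega
  have hdropj : cs.drop tw.length = d1 := by
    rw [hcs1, List.drop_left]
  have hk : pvSkip (fun c => c == ' ') d1 tw.length = tw.length + tw2.length := by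
    rw [pvSkip_spec, htw2]
  have hlen : cs.length = tw.length + tw2.length + d2.length := by
    rw [hcs1, hd1split]; simp; omega
  have hpre : cs = (tw ++ tw2) ++ d2 := by rw [hcs1, hd1split, List.append_assoc]
  have htake : cs.take (tw.length + tw2.length) = tw ++ tw2 := by
    conv_lhs => rw [hpre]
    rw [show tw.length + tw2.length = (tw ++ tw2).length by simp, List.take_left]
  have hget0 : cs[tw.length + tw2.length]? = d2[0]? := by
    conv_lhs => rw [hpre]
    rw [List.getElem?_append_right (by simp)]
    simp
  have hget1 : cs[tw.length + tw2.length + 1]? = d2[1]? := by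
    conv_lhs => rw [hpre]
    rw [List.getElem?_append_right (by simp)]
    simp
  have hdrop2 : cs.drop (tw.length + tw2.length + 2) = d2.drop 2 := by
    conv_lhs => rw [hpre]
    rw [show tw.length + tw2.length + 2 = (tw ++ tw2).length + 2 by simp]
    rw [List.drop_append]
    simp
  have hsub : cs.length - d2.length = tw.length + tw2.length := by omega
  simp only [pvArrowParse, pvArrowize, ← hd1, ← hd2, hj, hk, hdropj]
  rcases d2 with _ | ⟨c, d2t⟩
  · -- d2 = []
    by_cases h1 : tw.length = cs.length
    · simp [h1]
    · have : tw.length + tw2.length = cs.length := by simp at hlen; omega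
      simp [h1, this]
  · have h1 : ¬ tw.length = cs.length := by simp at hlen; omega
    have h2 : ¬ tw.length + tw2.length = cs.length := by simp at hlen; omega
    simp only [h1, if_false, h2, hget0]
    rcases d2t with _ | ⟨c', d2t'⟩
    · -- d2 = [c]
      have h3 : tw.length + tw2.length + 1 = cs.length := by simp at hlen; omega
      by_cases hc : c = '<'
      · subst hc; simp [h3]
      · simp [hc]
    · -- d2 = c :: c' :: d2t'
      have h3 : ¬ tw.length + tw2.length + 1 = cs.length := by simp at hlen; omega
      by_cases hc : c = '<'
      · subst hc
        by_cases hc' : c' = '-'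
        · subst hc'
          have hsub' : cs.length - (d2t'.length + 1 + 1) = tw.length + tw2.length := by
            simp at hlen; omega
          simp [h3, hget1, hdrop2, hsub', htake]
        · simp [h3, hget1, hc']
      · simp [hc]

theorem flatmapize_eq_fold (ls : List (List Char)) (lastLine : List Char) :
    pvFlatmapize (ls.map pvArrowize) lastLine = ls.reverse.foldl pvWrap lastLine := by
  induction ls with
  | nil => rfl
  | cons hd tl ih =>
      simp only [List.map_cons, List.reverse_cons, List.foldl_append, List.foldl_cons,
        List.foldl_nil, pvFlatmapize, ← ih]
      rw [pvArrowize_eq_parse hd]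
      unfold pvWrap
      cases h : pvArrowParse hd with
      | none => simp
      | some p => cases p; simp

-- ===== VERDICT (by name: the statement is the Claim_ definition above) =====
theorem desugar_spec : Claim_equal_desugar := by
  intro code _ _
  unfold Spec_desugar desugar desugar_alt
  simp only
  have hguard : ∀ cs, (pvArrowize cs).1 = (pvArrowParse cs).isSome := by
    intro cs
    rw [pvArrowize_eq_parse cs]
    cases h : pvArrowParse cs with
    | none => simp
    | some p => cases p; simp
  rw [hguard, flatmapize_eq_fold]
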